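-- pv_equiv track=rewrite | github.com/sani-yl/Data-Structures-Algorithms | module4/stack.py | undo_actions
-- ===== SOURCE A (Python) =====
-- def undo_actions(actions, n):
--     stack = actions[:]
--     undone = []
--
--     for _ in range(n):
--         if not stack:
--             break
--         undone.append(stack.pop())
--
--     return undone, stack
-- ===== SOURCE B (Python) =====
-- def undo_actions(actions, n):
--     if n <= 0:
--         return [], actions[:]
--     undone = actions[-n:][::-1]
--     stack = actions[:-n]
--     return undone, stack
-- ===== Notes on version B (the rewrite author's own statement) =====
-- stated objective: simpler
-- what changed: Replaces the copy-then-repeated-pop loop with two slice expressions: the last min(n, len) elements reversed and the prefix before them, with a single n <= 0 guard.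
import Mathlib
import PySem

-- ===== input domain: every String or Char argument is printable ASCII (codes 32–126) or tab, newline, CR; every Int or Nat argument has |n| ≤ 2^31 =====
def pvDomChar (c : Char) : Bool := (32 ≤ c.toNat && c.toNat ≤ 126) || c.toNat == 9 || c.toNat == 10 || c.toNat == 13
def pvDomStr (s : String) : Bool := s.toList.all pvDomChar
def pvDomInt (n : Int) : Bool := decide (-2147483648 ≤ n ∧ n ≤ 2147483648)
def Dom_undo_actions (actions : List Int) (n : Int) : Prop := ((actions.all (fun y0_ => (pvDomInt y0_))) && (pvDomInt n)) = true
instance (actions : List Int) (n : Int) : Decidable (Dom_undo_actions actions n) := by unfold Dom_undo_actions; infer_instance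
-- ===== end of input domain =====

-- B replaces A's copy-then-repeated-pop loop by slice arithmetic (no per-element loop); objective: simpler.

-- ===== PORT A =====
-- the 'for _ in range(n)' loop of A: state (stack, undone); range(n) runs max(n,0) times.
-- 'stack.pop()' on the guarded nonempty stack is getLastD/dropLast (exact there).
def undoLoopA : Nat → List Int → List Int → List Int × List Int
  | 0, stack, undone => (undone, stack)
  | k + 1, stack, undone =>
    if stack = [] then (undone, stack)
    else undoLoopA k stack.dropLast (undone ++ [stack.getLastD 0])

def undo_actions (actions : List Int) (n : Int) : List Int × List Int :=
  undoLoopA n.toNat actions []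

-- ===== PORT B =====
def undo_actions_alt (actions : List Int) (n : Int) : List Int × List Int :=
  if n ≤ 0 then ([], actions)
  else ((PySem.List.slice actions (some (-n)) none).reverse,
        PySem.List.slice actions none (some (-n)))

-- ===== PRECONDITION & SPEC =====
def Spec_undo_actions (actions : List Int) (n : Int) (out : List Int × List Int) : Prop := out = undo_actions_alt actions n
instance (actions : List Int) (n : Int) (out : List Int × List Int) : Decidable (Spec_undo_actions actions n out) := by unfold Spec_undo_actions; infer_instance

-- ===== CLAIM (what is proved, stated in full; the proofs are below) =====
def Claim_equal_undo_actions : Prop := ∀ (actions : List Int) (n : Int), Dom_undo_actions actions n → Spec_undo_actions actions n (undo_actions actions n)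

-- ===== LEMMAS AND PROOFS =====

-- invariant of A's loop: k pops off 'stack' leave take (len-k) and append drop (len-k) reversed
theorem undoLoopA_eq (k : Nat) : ∀ (stack undone : List Int),
    undoLoopA k stack undone
      = (undone ++ (stack.drop (stack.length - k)).reverse, stack.take (stack.length - k)) := by
  induction k with
  | zero =>
      intro stack undone
      simp [undoLoopA]
  | succ k ih =>
      intro stack undone
      rcases eq_or_ne stack [] with h | h
      · subst h; simp [undoLoopA]
      · have hlast := List.dropLast_append_getLast h
        have hlen : 0 < stack.length := List.length_pos_iff.mpr h
        rw [undoLoopA, if_neg h, ih]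
        have hdl : stack.dropLast.length = stack.length - 1 := by simp
        have hd : stack.drop (stack.length - (k + 1))
            = stack.dropLast.drop (stack.dropLast.length - k) ++ [stack.getLast h] := by
          conv_lhs => rw [← hlast]
          rw [List.drop_append_of_le_length (by simp)]
          congr 2
          simp
        have ht : stack.take (stack.length - (k + 1))
            = stack.dropLast.take (stack.dropLast.length - k) := by
          conv_lhs => rw [← hlast]
          rw [List.take_append_of_le_length (by simp)]
          congr 1
          simp
        rw [hd, ht]
        simp [List.getLastD_eq_getLast?, List.getLast?_eq_getLast_of_ne_nil h]

-- ===== VERDICT (by name: the statement is the Claim_ definition above) =====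
theorem undo_actions_spec : Claim_equal_undo_actions := by
  intro actions n _
  unfold Spec_undo_actions undo_actions undo_actions_alt
  by_cases hn : n ≤ 0
  · have : n.toNat = 0 := Int.toNat_of_nonpos hn
    simp [hn, this, undoLoopA]
  · have hpos : 0 < n.toNat := by omega
    have hn' : (-n : Int) = -(n.toNat : Int) := by omega
    rw [if_neg hn, hn',
        PySem.List.slice_from_neg_natCast actions (k := n.toNat) hpos,
        PySem.List.slice_to_neg_natCast actions (k := n.toNat) hpos,
        undoLoopA_eq]
    simp
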